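-- pv_equiv track=rewrite | github.com/cpccu/eid-code-fest-2024 | I/50437339_AC_Rafi151_I.py | represent_as_sum_of_round_numbers
-- ===== SOURCE A (Python) =====
-- def represent_as_sum_of_round_numbers(n):
--     summands = []
--     multiplier = 1
--     while n > 0:
--         digit = n % 10
--         if digit != 0:
--             summands.append(digit * multiplier)
--         n //= 10
--         multiplier *= 10
--     return summands
-- ===== SOURCE B (Python) =====
-- def represent_as_sum_of_round_numbers(n):
--     # Peel digits from the most significant side, then reverse to match LSB-first order.
--     if n <= 0:
--         return []
--     place = 1
--     while place * 10 <= n: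
--         place *= 10
--     out = []
--     while place > 0:
--         d = n // place
--         if d != 0:
--             out.append(d * place)
--         n %= place
--         place //= 10
--     return out[::-1]
-- ===== Notes on version B (the rewrite author's own statement) =====
-- stated objective: alternative
-- what changed: B first finds the largest power of ten not exceeding n, then peels digits from the most significant place downward via floor division and remainder and reverses the collected list, instead of A's least-significant-first modulo loop with a growing multiplier.
import Mathlib
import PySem

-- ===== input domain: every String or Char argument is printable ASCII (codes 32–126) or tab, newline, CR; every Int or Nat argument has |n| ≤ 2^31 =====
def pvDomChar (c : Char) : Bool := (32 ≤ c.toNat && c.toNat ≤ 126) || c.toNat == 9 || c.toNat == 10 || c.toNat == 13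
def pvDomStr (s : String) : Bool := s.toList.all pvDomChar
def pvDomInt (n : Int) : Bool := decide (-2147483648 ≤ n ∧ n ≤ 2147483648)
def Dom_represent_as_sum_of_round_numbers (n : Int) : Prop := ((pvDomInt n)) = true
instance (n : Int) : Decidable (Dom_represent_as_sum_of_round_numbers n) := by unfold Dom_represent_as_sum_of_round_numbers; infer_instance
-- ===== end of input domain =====

-- B peels digits from the most significant place downward (finding the largest power of 10
-- first) and reverses at the end, instead of A's LSB-first divide-by-10 loop; objective: alternative.


-- ===== PORT A =====
-- while n > 0: digit = n % 10; if digit != 0: summands.append(digit*multiplier); n //= 10; multiplier *= 10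
def goA (n multiplier : Int) (summands : List Int) : List Int :=
  if 0 < n then
    goA (PySem.Int.floordiv n 10) (multiplier * 10)
      (if PySem.Int.mod n 10 ≠ 0 then summands ++ [PySem.Int.mod n 10 * multiplier] else summands)
  else summands
termination_by n.toNat
decreasing_by
  simp only [PySem.Int.floordiv, Int.fdiv_eq_ediv]
  simp only [show ((0:Int) ≤ 10 ∨ (10:Int) ∣ n) from Or.inl (by norm_num), if_true]
  omega

def represent_as_sum_of_round_numbers (n : Int) : List Int := goA n 1 []

-- ===== PORT B =====
-- while place * 10 <= n: place *= 10   (the proof argument only certifies 0 < place for termination)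
def findPlace (n place : Int) (hp : 0 < place) : Int :=
  if place * 10 ≤ n then findPlace n (place * 10) (by positivity) else place
termination_by (n - place).toNat
decreasing_by omega

-- while place > 0: d = n // place; if d != 0: out.append(d*place); n %= place; place //= 10
def goB (n place : Int) (out : List Int) : List Int :=
  if 0 < place then
    goB (PySem.Int.mod n place) (PySem.Int.floordiv place 10)
      (if PySem.Int.floordiv n place ≠ 0 then out ++ [PySem.Int.floordiv n place * place] else out)
  else out
termination_by place.toNat
decreasing_by
  simp only [PySem.Int.floordiv, Int.fdiv_eq_ediv]
  simp only [show ((0:Int) ≤ 10 ∨ (10:Int) ∣ place) from Or.inl (by norm_num), if_true]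
  omega

def represent_as_sum_of_round_numbers_alt (n : Int) : List Int :=
  if n ≤ 0 then [] else (goB n (findPlace n 1 one_pos) []).reverse

-- ===== PRECONDITION & SPEC =====
def Spec_represent_as_sum_of_round_numbers (n : Int) (out : List Int) : Prop := out = represent_as_sum_of_round_numbers_alt n
instance (n : Int) (out : List Int) : Decidable (Spec_represent_as_sum_of_round_numbers n out) := by unfold Spec_represent_as_sum_of_round_numbers; infer_instance

-- ===== CLAIM (what is proved, stated in full; the proofs are below) =====
def Claim_equal_represent_as_sum_of_round_numbers : Prop := ∀ (n : Int), Dom_represent_as_sum_of_round_numbers n → Spec_represent_as_sum_of_round_numbers n (represent_as_sum_of_round_numbers n)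

-- ===== LEMMAS AND PROOFS =====

lemma fdiv_nonneg_divisor (a b : Int) (h : 0 ≤ b) : PySem.Int.floordiv a b = a / b := by
  simp [PySem.Int.floordiv, Int.fdiv_eq_ediv, h]

lemma fmod_nonneg_divisor (a b : Int) (h : 0 ≤ b) : PySem.Int.mod a b = a % b := by
  simp [PySem.Int.mod, Int.fmod_eq_emod, h]

-- proof-side pure recursions (LSB-first for A, MSB-first for B), in Euclidean div/mod
def aRec (n m : Int) : List Int :=
  if 0 < n then (if n % 10 ≠ 0 then [n % 10 * m] else []) ++ aRec (n / 10) (m * 10) else []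
termination_by n.toNat
decreasing_by omega

def bRec (n p : Int) : List Int :=
  if 0 < p then (if n / p ≠ 0 then [n / p * p] else []) ++ bRec (n % p) (p / 10) else []
termination_by p.toNat
decreasing_by omega

lemma goA_eq (n m : Int) (acc : List Int) : goA n m acc = acc ++ aRec n m := by
  rw [goA, aRec]
  by_cases h : 0 < n
  · rw [if_pos h, if_pos h, goA_eq,
      fmod_nonneg_divisor n 10 (by norm_num), fdiv_nonneg_divisor n 10 (by norm_num)]
    split <;> simp
  · rw [if_neg h, if_neg h]; simp
termination_by n.toNat
decreasing_by simp only [fdiv_nonneg_divisor n 10 (by norm_num)]; omega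

lemma goB_eq (n p : Int) (acc : List Int) : goB n p acc = acc ++ bRec n p := by
  rw [goB, bRec]
  by_cases h : 0 < p
  · rw [if_pos h, if_pos h, goB_eq, fmod_nonneg_divisor n p (le_of_lt h),
      fdiv_nonneg_divisor n p (le_of_lt h), fdiv_nonneg_divisor p 10 (by norm_num)]
    split <;> simp
  · rw [if_neg h, if_neg h]; simp
termination_by p.toNat
decreasing_by simp only [fdiv_nonneg_divisor p 10 (by norm_num)]; omega

lemma aRec_unfold (n m : Int) (h : 0 ≤ n) :
    aRec n m = (if n % 10 ≠ 0 then [n % 10 * m] else []) ++ aRec (n / 10) (m * 10) := by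
  rw [aRec]
  rcases lt_or_eq_of_le h with h' | h'
  · simp [h']
  · simp [← h']
    rw [aRec]; simp

lemma aRec_scale (n m : Int) : aRec n m = (aRec n 1).map (· * m) := by
  by_cases h : 0 < n
  · conv_lhs => rw [aRec]
    conv_rhs => rw [aRec]
    rw [if_pos h, if_pos h, List.map_append]
    rw [aRec_scale (n / 10) (m * 10), aRec_scale (n / 10) (1 * 10), List.map_map]
    have hcomp : ((· * m) ∘ (· * (1 * 10)) : Int → Int) = (· * (m * 10)) := by
      funext x; simp; ring
    rw [hcomp]
    split <;> simp [mul_comm]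
  · rw [aRec, if_neg h, aRec, if_neg h]; simp
termination_by n.toNat
decreasing_by all_goals omega

lemma emod_mul_ediv (n P : Int) : n % (10 * P) / 10 = n / 10 % P := by
  have h1 : n / (10 * P) = n / 10 / P := (Int.ediv_ediv_of_nonneg (y := 10) (by norm_num)).symm
  rw [Int.emod_def, Int.emod_def, h1]
  have h2 : n - 10 * P * (n / 10 / P) = n + 10 * (-(P * (n / 10 / P))) := by ring
  rw [h2, Int.add_mul_ediv_left n _ (by norm_num : (10:Int) ≠ 0)]
  ring

lemma aRec_split (k : Nat) : ∀ n : Int, 0 ≤ n → n < 10 ^ (k + 1) →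
    aRec n 1 = aRec (n % 10 ^ k) 1 ++ (if n / 10 ^ k ≠ 0 then [n / 10 ^ k * 10 ^ k] else []) := by
  induction k with
  | zero =>
    intro n h0 h1
    simp only [pow_zero] at *
    have e1 : n % 1 = 0 := by omega
    have e2 : n / 1 = n := by omega
    have e3 : n % 10 = n := by omega
    have e4 : n / 10 = 0 := by omega
    rw [e1, e2, aRec_unfold n 1 h0, e3, e4]
    rw [show aRec 0 1 = [] from by rw [aRec]; simp,
        show aRec 0 (1 * 10) = [] from by rw [aRec]; simp]
    simp
  | succ k ih =>
    intro n h0 h1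
    have hPk : (0:Int) < 10 ^ k := by positivity
    have hPk1 : (0:Int) < 10 ^ (k + 1) := by positivity
    have hd0 : 0 ≤ n / 10 := Int.ediv_nonneg h0 (by norm_num)
    have hd1 : n / 10 < 10 ^ (k + 1) := by
      have e : (10:Int) ^ (k + 1 + 1) = 10 ^ (k + 1) * 10 := by ring
      omega
    -- left side
    rw [aRec_unfold n 1 h0, aRec_scale (n / 10) (1 * 10), ih (n / 10) hd0 hd1]
    -- right side
    have hr0 : 0 ≤ n % 10 ^ (k + 1) := Int.emod_nonneg n (by positivity)
    rw [aRec_unfold (n % 10 ^ (k + 1)) 1 hr0, aRec_scale (n % 10 ^ (k + 1) / 10) (1 * 10)]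
    have epow : (10:Int) ^ (k + 1) = 10 * 10 ^ k := by ring
    have em : n % 10 ^ (k + 1) % 10 = n % 10 := by
      rw [epow]; exact Int.emod_emod_of_dvd n ⟨10 ^ k, rfl⟩
    have ed : n % 10 ^ (k + 1) / 10 = n / 10 % 10 ^ k := by
      rw [epow]; exact emod_mul_ediv n (10 ^ k)
    have etop : n / 10 / 10 ^ k = n / 10 ^ (k + 1) := by
      rw [Int.ediv_ediv_of_nonneg (y := 10) (by norm_num), ← epow]
    rw [em, ed, etop, List.map_append]
    have emap : ((if n / 10 ^ (k+1) ≠ 0 then [n / 10 ^ (k+1) * 10 ^ k] else []).map (· * (1 * 10)))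
        = (if n / 10 ^ (k+1) ≠ 0 then [n / 10 ^ (k+1) * 10 ^ (k+1)] else []) := by
      split <;> simp; ring
    rw [emap, List.append_assoc]

lemma bRec_eq_aRec (k : Nat) : ∀ n : Int, 0 ≤ n → n < 10 ^ (k + 1) →
    bRec n (10 ^ k) = (aRec n 1).reverse := by
  induction k with
  | zero =>
    intro n h0 h1
    simp only [pow_zero] at *
    rw [bRec]
    have e1 : n % 1 = 0 := by omega
    have e2 : n / 1 = n := by omega
    have e3 : (1:Int) / 10 = 0 := by norm_num
    simp only [show (0:Int) < 1 from one_pos, if_true, e1, e2, e3]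
    rw [show bRec 0 0 = [] from by rw [bRec]; simp]
    rw [aRec_unfold n 1 h0]
    have e4 : n % 10 = n := by omega
    have e5 : n / 10 = 0 := by omega
    rw [e4, e5, show aRec 0 (1 * 10) = [] from by rw [aRec]; simp]
    split <;> simp
  | succ k ih =>
    intro n h0 h1
    have hPk : (0:Int) < 10 ^ k := by positivity
    have hPk1 : (0:Int) < 10 ^ (k + 1) := by positivity
    rw [bRec]
    have ed10 : (10:Int) ^ (k + 1) / 10 = 10 ^ k := by
      rw [show (10:Int) ^ (k + 1) = 10 ^ k * 10 from by ring]
      exact Int.mul_ediv_cancel _ (by norm_num)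
    have hr0 : 0 ≤ n % 10 ^ (k + 1) := Int.emod_nonneg n (by positivity)
    have hr1 : n % 10 ^ (k + 1) < 10 ^ (k + 1) := Int.emod_lt_of_pos n hPk1
    simp only [hPk1, if_true, ed10]
    rw [ih (n % 10 ^ (k + 1)) hr0 hr1, aRec_split (k + 1) n h0 h1, List.reverse_append]
    congr 1
    split <;> simp

-- findPlace returns a power of 10 with result ≤ n < 10 * result (used by the verdict proof)
lemma findPlace_spec (n place : Int) (hp : 0 < place) (hle : place ≤ n) :
    ∃ k : Nat, findPlace n place hp = place * 10 ^ k ∧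
      findPlace n place hp ≤ n ∧ n < 10 * findPlace n place hp := by
  rw [findPlace]
  by_cases h : place * 10 ≤ n
  · simp only [h, if_true]
    obtain ⟨k, e, a, b⟩ := findPlace_spec n (place * 10) (by positivity) h
    exact ⟨k + 1, by rw [e]; ring, a, b⟩
  · simp only [h, if_false]
    exact ⟨0, by ring, hle, by omega⟩
termination_by (n - place).toNat
decreasing_by omega

-- ===== VERDICT (by name: the statement is the Claim_ definition above) =====
theorem represent_as_sum_of_round_numbers_spec : Claim_equal_represent_as_sum_of_round_numbers := by
  intro n _
  unfold Spec_represent_as_sum_of_round_numbers represent_as_sum_of_round_numbers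
    represent_as_sum_of_round_numbers_alt
  by_cases h : n ≤ 0
  · simp only [h, if_true]
    rw [goA]; simp [show ¬ 0 < n from by omega]
  · simp only [h, if_false]
    have h1 : (1:Int) ≤ n := by omega
    obtain ⟨k, hk, hle, hlt⟩ := findPlace_spec n 1 one_pos h1
    rw [goA_eq, goB_eq, hk]
    simp only [one_mul] at *
    rw [bRec_eq_aRec k n (by omega) (by rw [pow_succ]; omega)]
    simp
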